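-- pv_equiv track=rewrite | github.com/alstjrwjd99/BaekJun | 프로그래머스/3/12987. 숫자 게임/숫자 게임.py | solution
-- ===== SOURCE A (Python) =====
-- from collections import deque
--
-- def solution(A, B):
--     answer = -1
--
--     A.sort(reverse=True)
--     B.sort(reverse=True)
--
--     dq = deque(B)
--     cnt = 0
--     for i in range(len(A)):
--         if A[i] >= dq[0]:
--             dq.pop()
--         else:
--             dq.popleft()
--             cnt += 1
--     answer = cnt
--     return answer
-- ===== SOURCE B (Python) =====
-- def solution(A, B):
--     A.sort(reverse=True)
--     B.sort(reverse=True)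
--     cnt = 0
--     j = 0
--     for a in A:
--         if j < len(B) and B[j] > a:
--             cnt += 1
--             j += 1
--     return cnt
-- ===== Notes on version B (the rewrite author's own statement) =====
-- stated objective: simpler
-- what changed: Replaces the two-ended deque (peek front, pop from back or front) with a monotone single-direction two-pointer scan over the two descending-sorted lists, counting a win and advancing the B pointer exactly when B[j] > A[i].
-- crash fix: When len(A) > len(B), A raises IndexError (dq[0] on an emptied deque); B simply returns the number of wins collected, 0 at the witness ([1], []). — e.g. on solution([1], []): A raises IndexError, B returns 0
import Mathlib
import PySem

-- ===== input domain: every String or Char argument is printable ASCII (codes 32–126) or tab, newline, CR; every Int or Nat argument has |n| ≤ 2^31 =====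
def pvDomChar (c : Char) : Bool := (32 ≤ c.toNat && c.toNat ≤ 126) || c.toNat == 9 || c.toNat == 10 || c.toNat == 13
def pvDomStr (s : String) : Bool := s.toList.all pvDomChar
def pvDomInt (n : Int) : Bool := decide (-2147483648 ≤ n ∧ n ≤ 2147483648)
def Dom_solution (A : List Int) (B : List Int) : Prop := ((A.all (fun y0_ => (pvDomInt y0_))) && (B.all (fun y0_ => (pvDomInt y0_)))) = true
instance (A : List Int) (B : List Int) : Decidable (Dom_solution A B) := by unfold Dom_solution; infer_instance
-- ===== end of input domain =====

-- B replaces A's two-ended deque with a single-direction two-pointer scan (same cost, simpler).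
-- Both Pythons sort their arguments in place (descending); the equivalence proved here is about the return value only.

-- ===== PORT A =====
-- A's loop over range(len(A)) reads the sorted A sequentially; dq is the deque (front = head, pop() = dropLast, popleft() = tail).
def solLoopA : List Int → List Int → Int → Int
  | [], _, cnt => cnt
  | a :: rest, dq, cnt =>
    match dq with
    | [] => cnt  -- dq[0] raises IndexError here (only reachable when len A > len B, outside Pre_solution)
    | front :: dqTail =>
      if front ≤ a then solLoopA rest dq.dropLast cnt
      else solLoopA rest dqTail (cnt + 1)

def solution (A : List Int) (B : List Int) : Int :=
  let sA := PySem.List.sorted A (fun x => x) true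
  let sB := PySem.List.sorted B (fun x => x) true
  solLoopA sA sB 0

-- ===== PORT B =====
-- B's index j into sorted B is represented as the remaining suffix; the guard j < len(B) is that suffix being nonempty.
def solLoopB : List Int → List Int → Int → Int
  | [], _, cnt => cnt
  | a :: rest, bs, cnt =>
    match bs with
    | b :: bs' => if a < b then solLoopB rest bs' (cnt + 1) else solLoopB rest bs cnt
    | [] => solLoopB rest [] cnt

def solution_alt (A : List Int) (B : List Int) : Int :=
  solLoopB (PySem.List.sorted A (fun x => x) true) (PySem.List.sorted B (fun x => x) true) 0

-- ===== PRECONDITION & SPEC =====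
-- A raises IndexError (dq[0] on an emptied deque) exactly when len(A) > len(B); those inputs are excluded.
def Pre_solution (A : List Int) (B : List Int) : Prop := A.length ≤ B.length
instance (A : List Int) (B : List Int) : Decidable (Pre_solution A B) := by unfold Pre_solution; infer_instance
def pvWitness_solution : List Int × List Int := ([3, 1], [2, 4, 5])

-- When len(A) > len(B), A raises IndexError; B returns the number of wins collected so far.
def Raises_solution (A : List Int) (B : List Int) : Prop := B.length < A.length
instance (A : List Int) (B : List Int) : Decidable (Raises_solution A B) := by unfold Raises_solution; infer_instance
def pvRaiseWitness_solution : List Int × List Int := ([1], [])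
def pvRaiseWitnessOut_solution : Int := 0

def Spec_solution (A : List Int) (B : List Int) (out : Int) : Prop := out = solution_alt A B
instance (A : List Int) (B : List Int) (out : Int) : Decidable (Spec_solution A B out) := by unfold Spec_solution; infer_instance

-- ===== CLAIM (what is proved, stated in full; the proofs are below) =====
def Claim_equal_solution : Prop := ∀ (A : List Int) (B : List Int), Dom_solution A B → Pre_solution A B → Spec_solution A B (solution A B)
def Claim_raises_solution : Prop := (∀ (A : List Int) (B : List Int), Dom_solution A B → Raises_solution A B → ¬ Pre_solution A B) ∧ (Dom_solution (pvRaiseWitness_solution.1) (pvRaiseWitness_solution.2) ∧ Raises_solution (pvRaiseWitness_solution.1) (pvRaiseWitness_solution.2) ∧ solution_alt (pvRaiseWitness_solution.1) (pvRaiseWitness_solution.2) = pvRaiseWitnessOut_solution)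

-- ===== LEMMAS AND PROOFS =====
-- Invariant: A's deque is always a prefix of B's remaining suffix... more precisely, the deque dq is
-- a prefix of the two-pointer scan's remaining list bs (popleft on both keeps this; pop-from-back
-- shrinks only dq), and dq stays long enough to serve every remaining A card.
theorem solLoop_eq (sA : List Int) : ∀ (dq bs : List Int) (cnt : Int),
    dq <+: bs → sA.length ≤ dq.length → solLoopA sA dq cnt = solLoopB sA bs cnt := by
  induction sA with
  | nil => intro dq bs cnt _ _; simp [solLoopA, solLoopB]
  | cons a rest ih =>
    intro dq bs cnt hpre hlen
    match dq, hpre with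
    | [], _ => simp at hlen
    | d :: dq', hpre =>
      obtain ⟨t, ht⟩ := hpre
      subst ht
      simp only [solLoopA, solLoopB, List.cons_append]
      by_cases h : d ≤ a
      · rw [if_pos h, if_neg (by omega)]
        exact ih _ _ _ ((List.dropLast_prefix _).trans ⟨t, rfl⟩)
          (by simp at hlen ⊢; omega)
      · rw [if_neg h, if_pos (by omega)]
        exact ih _ _ _ ⟨t, rfl⟩ (by simp at hlen ⊢; omega)

-- ===== VERDICT (by name: the statement is the Claim_ definition above) =====
theorem solution_spec : Claim_equal_solution := by
  intro A B _ hpre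
  unfold Spec_solution solution solution_alt
  exact solLoop_eq _ _ _ _ (List.prefix_refl _)
    (by simpa [PySem.List.length_sorted] using hpre)

@[simp] theorem solution_raises : Claim_raises_solution := by
  unfold Claim_raises_solution
  exact ⟨fun A B _ h hp => by unfold Raises_solution at h; unfold Pre_solution at hp; omega, by decide⟩
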